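-- pv_equiv track=rewrite | github.com/imasharc/aegis_project | backend/agent/summarization/summarization_formatter.py | _group_citations_by_domain
-- ===== SOURCE A (Python) =====
-- from typing import Dict, List, Any, Optional
--
-- def _group_citations_by_domain(unified_citations: List[Dict[str, Any]]) -> Dict[str, List[Dict[str, Any]]]:
--     """
--     Group citations by domain for sophisticated presentation.
--
--     This grouping helps users understand the comprehensive coverage they're
--     receiving and see how different types of expertise contribute to the guidance.
--     """
--     grouped = {}
--
--     for citation in unified_citations:
--         domain = citation.get('source_type', 'Unknown')
--         if domain not in grouped:
--             grouped[domain] = []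
--         grouped[domain].append(citation)
--
--     # Sort domains in logical order for presentation
--     domain_order = ['GDPR', 'Polish Law', 'Internal Security']
--     ordered_grouped = {}
--
--     for domain in domain_order:
--         if domain in grouped:
--             ordered_grouped[domain] = grouped[domain]
--
--     # Add any other domains not in the standard order
--     for domain, citations in grouped.items():
--         if domain not in ordered_grouped:
--             ordered_grouped[domain] = citations
--
--     return ordered_grouped
-- ===== SOURCE B (Python) =====
-- def _group_citations_by_domain(unified_citations):
--     grouped = {}
--     for citation in unified_citations:
--         domain = citation.get('source_type', 'Unknown')
--         grouped[domain] = grouped.get(domain, []) + [citation]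
--     priority = {d: i for i, d in enumerate(['GDPR', 'Polish Law', 'Internal Security'])}
--     return {d: grouped[d] for d in sorted(grouped, key=lambda d: priority.get(d, 3))}
-- ===== Notes on version B (the rewrite author's own statement) =====
-- stated objective: alternative
-- what changed: A's two ordering loops (scan the fixed domain_order, then re-scan grouped for leftover domains) are replaced by one stable sort of the grouped keys under a priority map in which all unknown domains tie, so stability keeps their first-appearance order.
import Mathlib
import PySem

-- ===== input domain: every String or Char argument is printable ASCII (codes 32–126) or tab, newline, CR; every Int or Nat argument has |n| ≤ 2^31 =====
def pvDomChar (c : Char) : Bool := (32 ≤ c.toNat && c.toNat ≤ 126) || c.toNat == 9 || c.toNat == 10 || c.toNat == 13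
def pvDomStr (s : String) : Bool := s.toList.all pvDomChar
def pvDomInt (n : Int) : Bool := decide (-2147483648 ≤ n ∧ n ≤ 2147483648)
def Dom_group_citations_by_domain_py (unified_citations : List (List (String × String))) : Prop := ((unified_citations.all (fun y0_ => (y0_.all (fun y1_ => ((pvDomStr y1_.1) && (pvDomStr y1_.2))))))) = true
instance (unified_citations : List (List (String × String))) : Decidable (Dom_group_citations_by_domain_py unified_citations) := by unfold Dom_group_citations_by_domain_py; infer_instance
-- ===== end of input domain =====

-- B replaces A's two ordering loops by one stable sort of the grouped keys under a priority map (unknown domains tie at 3,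
-- so stability keeps their first-appearance order); objective: alternative decomposition, same result.

-- citation.get('source_type', 'Unknown'): first-match lookup in the citation's association list (shared by both ports)
def pvSourceType (c : List (String × String)) : String := (PySem.Dict.mk c).getD "source_type" "Unknown"

-- ===== PORT A =====
def group_citations_by_domain_py (unified_citations : List (List (String × String))) : List (String × List (List (String × String))) :=
  let grouped : PySem.Dict String (List (List (String × String))) :=
    unified_citations.foldl (fun g c =>
      let domain := pvSourceType c
      let g := if g.contains domain then g else g.insert domain []
      g.modify domain [] (fun l => l ++ [c])) PySem.Dict.empty
  let domain_order : List String := ["GDPR", "Polish Law", "Internal Security"]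
  let ordered_grouped : PySem.Dict String (List (List (String × String))) :=
    domain_order.foldl (fun d k => if grouped.contains k then d.insert k (grouped.getD k []) else d) PySem.Dict.empty
  let ordered_grouped2 : PySem.Dict String (List (List (String × String))) :=
    grouped.items.foldl (fun d p => if d.contains p.1 then d else d.insert p.1 p.2) ordered_grouped
  ordered_grouped2.items

-- ===== PORT B =====
def group_citations_by_domain_py_alt (unified_citations : List (List (String × String))) : List (String × List (List (String × String))) :=
  let grouped : PySem.Dict String (List (List (String × String))) :=
    unified_citations.foldl (fun g c =>
      let domain := pvSourceType c
      g.insert domain (g.getD domain [] ++ [c])) PySem.Dict.empty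
  let priority : PySem.Dict String Int :=
    PySem.Dict.ofList ((PySem.List.enumerate ["GDPR", "Polish Law", "Internal Security"]).map (fun p => (p.2, p.1)))
  let skeys := PySem.List.sorted grouped.keys (fun d => priority.getD d 3) false
  (skeys.foldl (fun d k => d.insert k (grouped.getD k [])) PySem.Dict.empty).items

-- ===== PRECONDITION & SPEC =====
def Spec_group_citations_by_domain_py (unified_citations : List (List (String × String))) (out : List (String × List (List (String × String)))) : Prop := out = group_citations_by_domain_py_alt unified_citations
instance (unified_citations : List (List (String × String))) (out : List (String × List (List (String × String)))) : Decidable (Spec_group_citations_by_domain_py unified_citations out) := by unfold Spec_group_citations_by_domain_py; infer_instance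

-- ===== CLAIM (what is proved, stated in full; the proofs are below) =====
def Claim_equal_group_citations_by_domain_py : Prop := ∀ (unified_citations : List (List (String × String))), Dom_group_citations_by_domain_py unified_citations → Spec_group_citations_by_domain_py unified_citations (group_citations_by_domain_py unified_citations)

-- ===== LEMMAS AND PROOFS =====

-- abbreviations for the proofs
def pvStepB (g : PySem.Dict String (List (List (String × String)))) (c : List (String × String)) : PySem.Dict String (List (List (String × String))) :=
  g.insert (pvSourceType c) (g.getD (pvSourceType c) [] ++ [c])

def pvG (ucs : List (List (String × String))) : PySem.Dict String (List (List (String × String))) :=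
  ucs.foldl pvStepB PySem.Dict.empty

def pvPrio (k : String) : Int :=
  if k = "GDPR" then 0 else if k = "Polish Law" then 1 else if k = "Internal Security" then 2 else 3

-- A's grouping step is B's grouping step
lemma pv_step_eq (g : PySem.Dict String (List (List (String × String)))) (c : List (String × String)) :
    (if g.contains (pvSourceType c) then g else g.insert (pvSourceType c) []).modify (pvSourceType c) [] (fun l => l ++ [c]) = pvStepB g c := by
  by_cases h : g.contains (pvSourceType c) = true
  · simp [pvStepB, PySem.Dict.modify, h]
  · have h' : g.contains (pvSourceType c) = false := by simpa using h
    simp [pvStepB, PySem.Dict.modify, h', PySem.Dict.getD_insert_self,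
      PySem.Dict.insert_insert_self, PySem.Dict.getD_of_not_contains _ _ h']

lemma pv_keys_nodup (ucs : List (List (String × String))) : (pvG ucs).keys.Nodup := by
  unfold pvG pvStepB
  exact PySem.Dict.nodup_keys_foldl_insert_key ucs pvSourceType
    (fun d c => d.getD (pvSourceType c) [] ++ [c]) PySem.Dict.empty (by simp [PySem.Dict.keys_empty])

-- A's first ordering loop (fresh distinct keys, guarded insert)
lemma pv_items_guard_insert (G : PySem.Dict String (List (List (String × String)))) :
    ∀ (l : List String) (d0 : PySem.Dict String (List (List (String × String)))),
    l.Nodup → (∀ k ∈ l, d0.contains k = false) →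
    (l.foldl (fun d k => if G.contains k then d.insert k (G.getD k []) else d) d0).items
      = d0.items ++ (l.filter (fun k => G.contains k)).map (fun k => (k, G.getD k [])) := by
  intro l
  induction l with
  | nil => intro d0 _ _; simp
  | cons k t ih =>
    intro d0 hnd hfresh
    have hk : d0.contains k = false := hfresh k (by simp)
    have hknot := (List.nodup_cons.mp hnd).1
    have hnd' := (List.nodup_cons.mp hnd).2
    by_cases hG : G.contains k = true
    · have hfresh' : ∀ j ∈ t, (d0.insert k (G.getD k [])).contains j = false := by
        intro j hj
        rw [PySem.Dict.contains_insert]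
        have hne : j ≠ k := fun e => hknot (e ▸ hj)
        simp [hne, hfresh j (List.mem_cons_of_mem _ hj)]
      rw [List.foldl_cons, if_pos hG, ih _ hnd' hfresh',
        PySem.Dict.items_insert_of_not_contains _ _ hk]
      simp [hG]
    · rw [List.foldl_cons, if_neg hG,
        ih _ hnd' (fun j hj => hfresh j (List.mem_cons_of_mem _ hj))]
      simp [hG]

-- A's second ordering loop (add the keys not already present)
lemma pv_items_fill (V : Type) [Inhabited V] :
    ∀ (l : List (String × V)) (d0 : PySem.Dict String V),
    (l.map (·.1)).Nodup →
    (l.foldl (fun d p => if d.contains p.1 then d else d.insert p.1 p.2) d0).items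
      = d0.items ++ l.filter (fun p => !(d0.contains p.1)) := by
  intro l
  induction l with
  | nil => intro d0 _; simp
  | cons p t ih =>
    intro d0 hnd
    rw [List.map_cons] at hnd
    have hpnot := (List.nodup_cons.mp hnd).1
    have hnd' : (t.map (·.1)).Nodup := (List.nodup_cons.mp hnd).2
    by_cases hc : d0.contains p.1 = true
    · rw [List.foldl_cons, if_pos hc, ih _ hnd']
      simp [hc]
    · have hc' : d0.contains p.1 = false := by simpa using hc
      rw [List.foldl_cons, if_neg hc, ih _ hnd']
      have hfc : t.filter (fun q => !((d0.insert p.1 p.2).contains q.1))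
          = t.filter (fun q => !(d0.contains q.1)) := by
        apply List.filter_congr
        intro q hq
        rw [PySem.Dict.contains_insert]
        have hne : q.1 ≠ p.1 := by
          intro e
          exact hpnot (e ▸ (List.mem_map.mpr ⟨q, hq, rfl⟩) : p.1 ∈ t.map (·.1))
        simp [hne]
      rw [hfc, PySem.Dict.items_insert_of_not_contains _ _ hc']
      simp [hc']

-- the priority dict is pvPrio
lemma pv_prio_eq (k : String) :
    (PySem.Dict.ofList ((PySem.List.enumerate ["GDPR", "Polish Law", "Internal Security"]).map (fun p => (p.2, p.1)))).getD k 3 = pvPrio k := by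
  have h : (PySem.Dict.ofList ((PySem.List.enumerate ["GDPR", "Polish Law", "Internal Security"]).map (fun p => (p.2, p.1))) : PySem.Dict String Int)
      = PySem.Dict.mk [("GDPR", 0), ("Polish Law", 1), ("Internal Security", 2)] := by decide
  rw [h]
  unfold pvPrio
  by_cases h1 : k = "GDPR"
  · subst h1; decide
  by_cases h2 : k = "Polish Law"
  · subst h2; decide
  by_cases h3 : k = "Internal Security"
  · subst h3; decide
  rw [if_neg h1, if_neg h2, if_neg h3]
  have b1 : ("GDPR" == k) = false := by simp [Ne.symm h1]
  have b2 : ("Polish Law" == k) = false := by simp [Ne.symm h2]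
  have b3 : ("Internal Security" == k) = false := by simp [Ne.symm h3]
  simp [PySem.Dict.getD_eq_get?_getD, b1, b2, b3, PySem.Dict.get?]

lemma pv_insertBy_pos {α : Type} (bef : α → α → Bool) (x : α) (l2 : List α)
    (h : ∀ y ∈ l2, bef x y = true) : PySem.List.insertBy bef x l2 = x :: l2 := by
  cases l2 with
  | nil => simp [PySem.List.insertBy]
  | cons y ys => simp [PySem.List.insertBy, h y (by simp)]

lemma pv_insertBy_split {α : Type} (bef : α → α → Bool) (x : α) (l1 l2 : List α)
    (h1 : ∀ y ∈ l1, bef x y = false) (h2 : ∀ y ∈ l2, bef x y = true) :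
    PySem.List.insertBy bef x (l1 ++ l2) = l1 ++ x :: l2 := by
  induction l1 with
  | nil => simpa using pv_insertBy_pos bef x l2 h2
  | cons a t ih =>
    have ha : bef x a = false := h1 a (by simp)
    simp only [List.cons_append, PySem.List.insertBy, ha]
    simp only [Bool.false_eq_true, if_false]
    rw [ih (fun y hy => h1 y (List.mem_cons_of_mem _ hy))]

-- a stable sort under a key into {0,1,2,3} is the concatenation of the four buckets, each in original order
lemma pv_sorted_bucket {α : Type} (key : α → Int) (hb : ∀ x : α, 0 ≤ key x ∧ key x ≤ 3) (xs : List α) :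
    PySem.List.sorted xs key false
      = xs.filter (fun k => key k == 0) ++ xs.filter (fun k => key k == 1)
        ++ xs.filter (fun k => key k == 2) ++ xs.filter (fun k => key k == 3) := by
  induction xs using List.reverseRecOn with
  | nil => simp [PySem.List.sorted_eq_foldl_insertBy]
  | append_singleton xs x ih =>
    have e : PySem.List.sorted (xs ++ [x]) key false
        = PySem.List.insertBy (fun a b => decide (key a < key b)) x (PySem.List.sorted xs key false) := by
      rw [PySem.List.sorted_eq_foldl_insertBy, PySem.List.sorted_eq_foldl_insertBy, List.foldl_append]
      rfl
    rw [e, ih]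
    have hin : ∀ (j : Int) (y : α), y ∈ xs.filter (fun k => key k == j) → key y = j := by
      intro j y hy
      simpa using (List.mem_filter.mp hy).2
    rcases hb x with ⟨hx0, hx3⟩
    have hlow : ∀ (j : Int), j ≤ key x → ∀ y ∈ xs.filter (fun k => key k == j), decide (key x < key y) = false := by
      intro j hj y hy
      have := hin j y hy
      simp only [decide_eq_false_iff_not]
      omega
    have hhigh : ∀ (j : Int), j > key x → ∀ y ∈ xs.filter (fun k => key k == j), decide (key x < key y) = true := by
      intro j hj y hy
      have := hin j y hy
      simp only [decide_eq_true_eq]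
      omega
    have hcase : key x = 0 ∨ key x = 1 ∨ key x = 2 ∨ key x = 3 := by omega
    simp only [List.filter_append, List.filter_cons, List.filter_nil]
    rcases hcase with hx | hx | hx | hx
    · have hs := pv_insertBy_split (fun a b => decide (key a < key b)) x
        (xs.filter (fun k => key k == 0))
        (xs.filter (fun k => key k == 1) ++ xs.filter (fun k => key k == 2) ++ xs.filter (fun k => key k == 3))
        (hlow 0 (by omega))
        (by intro y hy
            rcases List.mem_append.mp hy with hy' | hy'
            · rcases List.mem_append.mp hy' with hy'' | hy''
              · exact hhigh 1 (by omega) y hy''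
              · exact hhigh 2 (by omega) y hy''
            · exact hhigh 3 (by omega) y hy')
      simp only [List.append_assoc] at hs ⊢
      rw [hs]
      simp [hx]
    · have hs := pv_insertBy_split (fun a b => decide (key a < key b)) x
        (xs.filter (fun k => key k == 0) ++ xs.filter (fun k => key k == 1))
        (xs.filter (fun k => key k == 2) ++ xs.filter (fun k => key k == 3))
        (by intro y hy
            rcases List.mem_append.mp hy with hy' | hy'
            · exact hlow 0 (by omega) y hy'
            · exact hlow 1 (by omega) y hy')
        (by intro y hy
            rcases List.mem_append.mp hy with hy' | hy'
            · exact hhigh 2 (by omega) y hy'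
            · exact hhigh 3 (by omega) y hy')
      simp only [List.append_assoc] at hs ⊢
      rw [hs]
      simp [hx]
    · have hs := pv_insertBy_split (fun a b => decide (key a < key b)) x
        (xs.filter (fun k => key k == 0) ++ xs.filter (fun k => key k == 1) ++ xs.filter (fun k => key k == 2))
        (xs.filter (fun k => key k == 3))
        (by intro y hy
            rcases List.mem_append.mp hy with hy' | hy'
            · rcases List.mem_append.mp hy' with hy'' | hy''
              · exact hlow 0 (by omega) y hy''
              · exact hlow 1 (by omega) y hy''
            · exact hlow 2 (by omega) y hy')
        (hhigh 3 (by omega))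
      simp only [List.append_assoc] at hs ⊢
      rw [hs]
      simp [hx]
    · have hs := pv_insertBy_split (fun a b => decide (key a < key b)) x
        (xs.filter (fun k => key k == 0) ++ xs.filter (fun k => key k == 1) ++ xs.filter (fun k => key k == 2) ++ xs.filter (fun k => key k == 3))
        ([] : List α)
        (by intro y hy
            rcases List.mem_append.mp hy with hy' | hy'
            · rcases List.mem_append.mp hy' with hy'' | hy''
              · rcases List.mem_append.mp hy'' with hy3 | hy3
                · exact hlow 0 (by omega) y hy3
                · exact hlow 1 (by omega) y hy3
              · exact hlow 2 (by omega) y hy''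
            · exact hlow 3 (by omega) y hy')
        (by intro y hy; simp at hy)
      simp only [List.append_nil] at hs
      simp only [List.append_assoc] at hs ⊢
      rw [hs]
      simp [hx]

lemma pv_filter_single (K : List String) (hnd : K.Nodup) (a : String) :
    K.filter (fun k => k == a) = if a ∈ K then [a] else [] := by
  by_cases h : a ∈ K
  · rw [if_pos h, List.filter_beq, List.count_eq_one_of_mem hnd h]
    rfl
  · rw [if_neg h, List.filter_beq, List.count_eq_zero_of_not_mem h]
    rfl

lemma pv_items_empty {κ ν : Type} [BEq κ] : (PySem.Dict.empty : PySem.Dict κ ν).items = [] := rfl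

-- bucket predicates under pvPrio
lemma pv_prio_b0 (k : String) : (pvPrio k == 0) = (k == "GDPR") := by
  unfold pvPrio; by_cases h1 : k = "GDPR" <;> by_cases h2 : k = "Polish Law" <;> by_cases h3 : k = "Internal Security" <;> simp_all
lemma pv_prio_b1 (k : String) : (pvPrio k == 1) = (k == "Polish Law") := by
  unfold pvPrio; by_cases h1 : k = "GDPR" <;> by_cases h2 : k = "Polish Law" <;> by_cases h3 : k = "Internal Security" <;> simp_all
lemma pv_prio_b2 (k : String) : (pvPrio k == 2) = (k == "Internal Security") := by
  unfold pvPrio; by_cases h1 : k = "GDPR" <;> by_cases h2 : k = "Polish Law" <;> by_cases h3 : k = "Internal Security" <;> simp_all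
lemma pv_prio_b3 (k : String) : (pvPrio k == 3) = (!(decide (k ∈ (["GDPR", "Polish Law", "Internal Security"] : List String)))) := by
  unfold pvPrio; by_cases h1 : k = "GDPR" <;> by_cases h2 : k = "Polish Law" <;> by_cases h3 : k = "Internal Security" <;> simp_all

lemma pv_A_eq (ucs : List (List (String × String))) : group_citations_by_domain_py ucs =
    ((["GDPR", "Polish Law", "Internal Security"] : List String).filter (fun k => (pvG ucs).contains k)).map (fun k => (k, (pvG ucs).getD k []))
    ++ ((pvG ucs).keys.filter (fun k => !(decide (k ∈ (["GDPR", "Polish Law", "Internal Security"] : List String))))).map (fun k => (k, (pvG ucs).getD k [])) := by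
  have hstep : (fun (g : PySem.Dict String (List (List (String × String)))) (c : List (String × String)) =>
      (if g.contains (pvSourceType c) then g else g.insert (pvSourceType c) []).modify (pvSourceType c) [] (fun l => l ++ [c]))
      = pvStepB := funext fun g => funext fun c => pv_step_eq g c
  have hgrouped : ucs.foldl (fun g c =>
      (if g.contains (pvSourceType c) then g else g.insert (pvSourceType c) []).modify (pvSourceType c) [] (fun l => l ++ [c])) PySem.Dict.empty = pvG ucs := by
    unfold pvG; rw [hstep]
  have hndK : (pvG ucs).keys.Nodup := pv_keys_nodup ucs
  simp only [group_citations_by_domain_py]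
  rw [hgrouped]
  have hd1 := pv_items_guard_insert (pvG ucs) ["GDPR", "Polish Law", "Internal Security"] PySem.Dict.empty
    (by decide) (fun k _ => PySem.Dict.contains_empty k)
  have hnditems : ((pvG ucs).items.map (·.1)).Nodup := hndK
  rw [pv_items_fill _ (pvG ucs).items _ hnditems, hd1]
  have hd1keys : (["GDPR", "Polish Law", "Internal Security"].foldl
      (fun d k => if (pvG ucs).contains k then d.insert k ((pvG ucs).getD k []) else d) PySem.Dict.empty).keys
      = (["GDPR", "Polish Law", "Internal Security"] : List String).filter (fun k => (pvG ucs).contains k) := by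
    show ((["GDPR", "Polish Law", "Internal Security"].foldl
      (fun d k => if (pvG ucs).contains k then d.insert k ((pvG ucs).getD k []) else d) PySem.Dict.empty).items.map (·.1)) = _
    rw [hd1]
    simp [pv_items_empty, Function.comp_def]
  have hd1c : ∀ k, (["GDPR", "Polish Law", "Internal Security"].foldl
      (fun d k => if (pvG ucs).contains k then d.insert k ((pvG ucs).getD k []) else d) PySem.Dict.empty).contains k = true
      ↔ (k ∈ (["GDPR", "Polish Law", "Internal Security"] : List String) ∧ (pvG ucs).contains k = true) := by
    intro k
    rw [PySem.Dict.contains_iff_mem_keys, hd1keys, List.mem_filter]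
  have hGitems : (pvG ucs).items = (pvG ucs).keys.map (fun k => (k, (pvG ucs).getD k [])) :=
    PySem.Dict.items_eq_map_keys _ hndK []
  rw [hGitems, List.filter_map]
  have hfc : ((pvG ucs).keys.filter ((fun p => !((["GDPR", "Polish Law", "Internal Security"].foldl
        (fun d k => if (pvG ucs).contains k then d.insert k ((pvG ucs).getD k []) else d) PySem.Dict.empty).contains p.1))
        ∘ (fun k => (k, (pvG ucs).getD k []))))
      = (pvG ucs).keys.filter (fun k => !(decide (k ∈ (["GDPR", "Polish Law", "Internal Security"] : List String)))) := by
    apply List.filter_congr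
    intro k hk
    simp only [Function.comp]
    by_cases hmem : k ∈ (["GDPR", "Polish Law", "Internal Security"] : List String)
    · have : _ = true := (hd1c k).mpr ⟨hmem, (PySem.Dict.contains_iff_mem_keys _ _).mpr hk⟩
      rw [this]
      simp [hmem]
    · have : ¬ _ = true := fun h => hmem ((hd1c k).mp h).1
      rw [Bool.not_eq_true] at this
      rw [this]
      simp [hmem]
  rw [hfc]
  simp [pv_items_empty]

lemma pv_B_eq (ucs : List (List (String × String))) : group_citations_by_domain_py_alt ucs =
    (PySem.List.sorted (pvG ucs).keys pvPrio false).map (fun k => (k, (pvG ucs).getD k [])) := by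
  have hndK : (pvG ucs).keys.Nodup := pv_keys_nodup ucs
  simp only [group_citations_by_domain_py_alt]
  have hgrouped : ucs.foldl (fun g c => g.insert (pvSourceType c) (g.getD (pvSourceType c) [] ++ [c])) PySem.Dict.empty = pvG ucs := rfl
  rw [hgrouped]
  simp only [pv_prio_eq]
  have hsknd : ((PySem.List.sorted (pvG ucs).keys (fun d => pvPrio d) false).map (fun a => a)).Nodup := by
    simpa using ((PySem.List.sorted_perm (pvG ucs).keys (fun d => pvPrio d) false).nodup_iff.mpr hndK)
  rw [PySem.Dict.items_foldl_insert_fresh (PySem.List.sorted (pvG ucs).keys (fun d => pvPrio d) false)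
    (fun a => a) (fun a => (pvG ucs).getD a []) PySem.Dict.empty
    (fun a _ => PySem.Dict.contains_empty a) hsknd]
  simp [pv_items_empty]

theorem pv_main (ucs : List (List (String × String))) :
    group_citations_by_domain_py ucs = group_citations_by_domain_py_alt ucs := by
  have hndK : (pvG ucs).keys.Nodup := pv_keys_nodup ucs
  have c1 := PySem.Dict.contains_eq_decide_mem_keys (pvG ucs) "GDPR"
  have c2 := PySem.Dict.contains_eq_decide_mem_keys (pvG ucs) "Polish Law"
  have c3 := PySem.Dict.contains_eq_decide_mem_keys (pvG ucs) "Internal Security"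
  rw [pv_A_eq, pv_B_eq,
    pv_sorted_bucket pvPrio (fun x => by unfold pvPrio; split_ifs <;> omega) (pvG ucs).keys]
  rw [List.filter_congr (fun k _ => pv_prio_b0 k), List.filter_congr (fun k _ => pv_prio_b1 k),
    List.filter_congr (fun k _ => pv_prio_b2 k), List.filter_congr (fun k _ => pv_prio_b3 k)]
  rw [pv_filter_single _ hndK "GDPR", pv_filter_single _ hndK "Polish Law", pv_filter_single _ hndK "Internal Security"]
  by_cases m1 : "GDPR" ∈ (pvG ucs).keys <;> by_cases m2 : "Polish Law" ∈ (pvG ucs).keys <;>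
    by_cases m3 : "Internal Security" ∈ (pvG ucs).keys <;>
    simp [List.filter_nil, c1, c2, c3, m1, m2, m3]

-- ===== VERDICT (by name: the statement is the Claim_ definition above) =====
theorem group_citations_by_domain_py_spec : Claim_equal_group_citations_by_domain_py := by
  intro ucs _
  unfold Spec_group_citations_by_domain_py
  exact pv_main ucs
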